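-- pv_equiv track=rewrite | github.com/VishwamAI/Generative-Flex | fix_syntax_patterns_final_v64.py | fix_import_statements
-- ===== SOURCE A (Python) =====
-- def fix_import_statements(content: str) -> str:
--     """Fix import statement formatting and indentation."""
--     lines = content.split('\n')
--     fixed_lines = []
--     in_imports = True
--     import_section = []
--     other_lines = []
--
--     for line in lines:
--         stripped = line.strip()
--         if in_imports:
--             if stripped.startswith(('import ', 'from ')):
--                 import_section.append(stripped)
--             else:
--                 in_imports = False
--                 if stripped:
--                     other_lines.append(line)
--         else:
--             other_lines.append(line)
--
--     # Sort and deduplicate imports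
--     import_section = sorted(set(import_section))
--
--     # Add module docstring if not present
--     if not (other_lines and other_lines[0].strip().startswith('"""')):
--         fixed_lines.append('"""Module implementation."""\n')
--
--     # Add imports
--     fixed_lines.extend(import_section)
--     if import_section:
--         fixed_lines.append('')
--
--     # Add remaining lines
--     fixed_lines.extend(other_lines)
--
--     return '\n'.join(fixed_lines)
-- ===== SOURCE B (Python) =====
-- def fix_import_statements(content: str) -> str:
--     """Fix import statement formatting and indentation."""
--     lines = content.split('\n')
--     imports = []  # kept sorted and duplicate-free by ordered insertion
--     rest = []
--     for idx, line in enumerate(lines):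
--         s = line.strip()
--         if not (s.startswith('import ') or s.startswith('from ')):
--             rest = lines[idx:]
--             break
--         i = 0
--         while i < len(imports) and imports[i] < s:
--             i += 1
--         if not (i < len(imports) and imports[i] == s):
--             imports[i:i] = [s]
--     if rest and not rest[0].strip():
--         rest = rest[1:]
--     out = imports + ([''] if imports else []) + rest
--     if not (rest and rest[0].strip().startswith('"""')):
--         out = ['"""Module implementation."""\n'] + out
--     return '\n'.join(out)
-- ===== Notes on version B (the rewrite author's own statement) =====
-- stated objective: alternative
-- what changed: B drops A's in_imports flag, its three accumulator lists and the final sorted(set(...)): it peels leading import lines with a loop that breaks at the boundary, maintaining the imports as a sorted duplicate-free list by ordered insertion (insertion sort with dedup on the fly), then assembles the result from that list and the remaining slice.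
import Mathlib
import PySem

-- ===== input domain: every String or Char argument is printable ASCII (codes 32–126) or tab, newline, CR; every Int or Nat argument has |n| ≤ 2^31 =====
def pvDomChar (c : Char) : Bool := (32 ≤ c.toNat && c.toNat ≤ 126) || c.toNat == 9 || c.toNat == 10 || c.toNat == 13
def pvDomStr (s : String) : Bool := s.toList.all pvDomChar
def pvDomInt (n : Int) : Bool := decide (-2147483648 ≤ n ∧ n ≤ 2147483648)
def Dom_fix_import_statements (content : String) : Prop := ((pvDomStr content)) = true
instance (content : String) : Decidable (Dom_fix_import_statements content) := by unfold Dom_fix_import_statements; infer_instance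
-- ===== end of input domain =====

-- B replaces A's in_imports flag, its three accumulators and the final sorted(set(...)) by a
-- peeling loop that breaks at the boundary and keeps the imports sorted and duplicate-free by
-- ordered insertion; objective: alternative algorithm, same result.

-- stripped.startswith(('import ', 'from ')) — shared predicate of both sources
def pvStartsImp (s : String) : Bool :=
  PySem.Str.startswith s "import " || PySem.Str.startswith s "from "

-- ===== PORT A =====
-- one iteration of A's for-loop over the state (in_imports, import_section, other_lines)
def pvStepA (s : Bool × List String × List String) (line : String) : Bool × List String × List String :=
  let stripped := PySem.Str.strip line
  if s.1 then
    if pvStartsImp stripped then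
      (true, s.2.1 ++ [stripped], s.2.2)
    else
      (false, s.2.1, if stripped ≠ "" then s.2.2 ++ [line] else s.2.2)
  else
    (s.1, s.2.1, s.2.2 ++ [line])

def fix_import_statements (content : String) : String :=
  let lines := (PySem.Str.split? content "\n").getD []   -- sep "\n" ≠ "": split? is some
  let st := lines.foldl pvStepA (true, [], [])
  let importSection := PySem.List.sorted (PySem.Set.ofList st.2.1) (fun x => x) false
  let otherLines := st.2.2
  let fixedLines :=
    (if ¬ (otherLines ≠ [] ∧ PySem.Str.startswith (PySem.Str.strip (otherLines.headD "")) "\"\"\"")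
      then ["\"\"\"Module implementation.\"\"\"\n"] else [])
    ++ importSection
    ++ (if importSection ≠ [] then [""] else [])
    ++ otherLines
  PySem.Str.join "\n" fixedLines

-- ===== PORT B =====
-- the inner while loop: insert s into the sorted duplicate-free list, keeping it so
def pvIns (imports : List String) (s : String) : List String :=
  match imports with
  | [] => [s]
  | x :: t =>
    if x < s then x :: pvIns t s
    else if x = s then x :: t
    else s :: x :: t

-- the for-loop with its break: peel leading import lines (inserting each stripped one),
-- the break returns the remaining slice lines[idx:]
def pvPeel (imports : List String) (lines : List String) : List String × List String :=
  match lines with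
  | [] => (imports, [])
  | l :: t =>
    let s := PySem.Str.strip l
    if pvStartsImp s then pvPeel (pvIns imports s) t
    else (imports, l :: t)

def fix_import_statements_alt (content : String) : String :=
  let lines := (PySem.Str.split? content "\n").getD []   -- sep "\n" ≠ "": split? is some
  let p := pvPeel [] lines
  let imports := p.1
  let rest0 := p.2
  let rest := match rest0 with
    | r :: rs => if PySem.Str.strip r = "" then rs else r :: rs
    | [] => []
  let out := imports ++ (if imports ≠ [] then [""] else []) ++ rest
  let out' := if (match rest with
                  | r :: _ => PySem.Str.startswith (PySem.Str.strip r) "\"\"\""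
                  | [] => false)
              then out else "\"\"\"Module implementation.\"\"\"\n" :: out
  PySem.Str.join "\n" out'

-- ===== PRECONDITION & SPEC =====
def Spec_fix_import_statements (content : String) (out : String) : Prop := out = fix_import_statements_alt content
instance (content : String) (out : String) : Decidable (Spec_fix_import_statements content out) := by unfold Spec_fix_import_statements; infer_instance

-- ===== CLAIM (what is proved, stated in full; the proofs are below) =====
def Claim_equal_fix_import_statements : Prop := ∀ (content : String), Dom_fix_import_statements content → Spec_fix_import_statements content (fix_import_statements content)

-- ===== LEMMAS AND PROOFS =====

def pvIsImp (l : String) : Bool := pvStartsImp (PySem.Str.strip l)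

theorem stepA_true_imp (line : String) (imps others : List String)
    (h : pvStartsImp (PySem.Str.strip line) = true) :
    pvStepA (true, imps, others) line = (true, imps ++ [PySem.Str.strip line], others) := by
  simp only [pvStepA, h]; simp

theorem stepA_true_notimp (line : String) (imps others : List String)
    (h : pvStartsImp (PySem.Str.strip line) = false) :
    pvStepA (true, imps, others) line =
      (false, imps, if PySem.Str.strip line ≠ "" then others ++ [line] else others) := by
  simp only [pvStepA, h]; simp

theorem stepA_false (line : String) (imps others : List String) :
    pvStepA (false, imps, others) line = (false, imps, others ++ [line]) := by
  simp only [pvStepA]; simp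

-- once the flag is false, A's loop just appends every remaining line to other_lines
theorem foldA_false (ls : List String) (imps others : List String) :
    ls.foldl pvStepA (false, imps, others) = (false, imps, others ++ ls) := by
  induction ls generalizing others with
  | nil => simp
  | cons l t ih =>
    rw [List.foldl_cons, stepA_false, ih]; simp

-- A's loop computes the takeWhile/dropWhile split
theorem foldA_split (ls : List String) (imps others : List String) :
    ls.foldl pvStepA (true, imps, others) =
      ((ls.dropWhile pvIsImp).isEmpty,
       imps ++ (ls.takeWhile pvIsImp).map PySem.Str.strip,
       others ++ (match ls.dropWhile pvIsImp with
                  | r :: rs => if PySem.Str.strip r = "" then rs else r :: rs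
                  | [] => [])) := by
  induction ls generalizing imps others with
  | nil => simp
  | cons l t ih =>
    by_cases h : pvIsImp l = true
    · have h' : pvStartsImp (PySem.Str.strip l) = true := h
      rw [List.foldl_cons, stepA_true_imp _ _ _ h', ih]
      simp [h]
    · have h' : pvStartsImp (PySem.Str.strip l) = false := by
        simpa [pvIsImp] using h
      rw [List.foldl_cons, stepA_true_notimp _ _ _ h', foldA_false]
      have h'' : pvIsImp l = false := by simpa using h
      simp only [List.takeWhile_cons, List.dropWhile_cons, h'']
      by_cases he : PySem.Str.strip l = "" <;> simp [he]

theorem mem_pvIns (acc : List String) (s y : String) :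
    y ∈ pvIns acc s ↔ y = s ∨ y ∈ acc := by
  induction acc with
  | nil => simp [pvIns]
  | cons x t ih =>
    by_cases h1 : x < s
    · simp [pvIns, h1, ih]; tauto
    · by_cases h2 : x = s
      · subst h2; simp [pvIns]
      · simp [pvIns, h1, h2]

theorem pairwise_pvIns (acc : List String) (s : String)
    (h : acc.Pairwise (· < ·)) : (pvIns acc s).Pairwise (· < ·) := by
  induction acc with
  | nil => simp [pvIns]
  | cons x t ih =>
    simp only [pvIns]
    rcases List.pairwise_cons.mp h with ⟨hx, ht⟩
    split_ifs with h1 h2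
    · refine List.pairwise_cons.mpr ⟨?_, ih ht⟩
      intro y hy
      rcases (mem_pvIns t s y).mp hy with rfl | hy
      · exact h1
      · exact hx y hy
    · exact h
    · have h3 : s < x := lt_of_le_of_ne (le_of_not_gt h1) (fun e => h2 e.symm)
      refine List.pairwise_cons.mpr ⟨?_, h⟩
      intro y hy
      rcases List.mem_cons.mp hy with rfl | hy
      · exact h3
      · exact lt_trans h3 (hx y hy)

theorem pvIns_of_mem (acc : List String) (s : String)
    (hs : acc.Pairwise (· < ·)) (h : s ∈ acc) : pvIns acc s = acc := by
  induction acc with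
  | nil => simp at h
  | cons x t ih =>
    rcases List.pairwise_cons.mp hs with ⟨hx, ht⟩
    simp only [pvIns]
    split_ifs with h1 h2
    · have : s ∈ t := by
        rcases List.mem_cons.mp h with rfl | hm
        · exact absurd h1 (lt_irrefl s)
        · exact hm
      rw [ih ht this]
    · rfl
    · rcases List.mem_cons.mp h with rfl | hm
      · exact absurd rfl h2
      · exact absurd (hx s hm) (fun hlt => h1 hlt)

theorem pvIns_perm (acc : List String) (s : String) (h : s ∉ acc) :
    (pvIns acc s).Perm (acc ++ [s]) := by
  induction acc with
  | nil => simp [pvIns]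
  | cons x t ih =>
    simp only [pvIns]
    have hne : s ≠ x := fun e => h (e ▸ List.mem_cons_self)
    have hnt : s ∉ t := fun hm => h (List.mem_cons_of_mem x hm)
    split_ifs with h1 h2
    · exact List.Perm.cons x (ih hnt)
    · exact absurd h2.symm hne
    · simpa using (List.perm_append_comm (l₁ := [s]) (l₂ := x :: t))

-- the peeling of B's loop over xs equals A's collect-then-sorted(set(...)):
-- folding pvIns keeps a strictly sorted permutation of Set.ofList
theorem foldIns_invariant (xs : List String) (acc acc' : List String)
    (hp : acc.Pairwise (· < ·)) (hperm : acc.Perm acc') :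
    (xs.foldl pvIns acc).Pairwise (· < ·) ∧
    (xs.foldl pvIns acc).Perm (xs.foldl PySem.Set.add acc') := by
  induction xs generalizing acc acc' with
  | nil => exact ⟨hp, hperm⟩
  | cons x t ih =>
    simp only [List.foldl_cons]
    by_cases hm : x ∈ acc
    · have hm' : x ∈ acc' := hperm.mem_iff.mp hm
      rw [pvIns_of_mem acc x hp hm]
      have : PySem.Set.add acc' x = acc' := by
        simp [PySem.Set.add, PySem.Set.contains, hm']
      rw [this]
      exact ih acc acc' hp hperm
    · have hm' : x ∉ acc' := fun h => hm (hperm.mem_iff.mpr h)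
      have hadd : PySem.Set.add acc' x = acc' ++ [x] := by
        simp [PySem.Set.add, PySem.Set.contains, hm']
      rw [hadd]
      exact ih (pvIns acc x) (acc' ++ [x]) (pairwise_pvIns acc x hp)
        (List.Perm.trans (pvIns_perm acc x hm) (hperm.append_right [x]))

theorem foldIns_eq_sorted_set (xs : List String) :
    xs.foldl pvIns [] = PySem.List.sorted (PySem.Set.ofList xs) (fun x => x) false := by
  obtain ⟨hp, hperm⟩ := foldIns_invariant xs [] [] (by simp) (List.Perm.refl [])
  have : PySem.Set.ofList xs = xs.foldl PySem.Set.add [] := PySem.Set.ofList_eq_foldl xs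
  rw [this]
  exact (PySem.List.sorted_eq_of_perm_of_pairwise_lt _ _ (fun x => x) hperm hp).symm

-- B's peel loop is the takeWhile/dropWhile split with the fold of pvIns on the stripped prefix
theorem pvPeel_split (ls : List String) (imps : List String) :
    pvPeel imps ls =
      (((ls.takeWhile pvIsImp).map PySem.Str.strip).foldl pvIns imps,
       ls.dropWhile pvIsImp) := by
  induction ls generalizing imps with
  | nil => simp [pvPeel]
  | cons l t ih =>
    by_cases h : pvIsImp l = true
    · have h' : pvStartsImp (PySem.Str.strip l) = true := h
      simp only [pvPeel, h', ih, List.takeWhile_cons, List.dropWhile_cons, h]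
      simp
    · have h' : pvStartsImp (PySem.Str.strip l) = false := by simpa [pvIsImp] using h
      have h'' : pvIsImp l = false := by simpa using h
      simp [pvPeel, h', h'']

-- ===== VERDICT (by name: the statement is the Claim_ definition above) =====
theorem fix_import_statements_spec : Claim_equal_fix_import_statements := by
  intro content _
  show _ = _
  unfold fix_import_statements fix_import_statements_alt
  simp only [foldA_split, pvPeel_split, List.nil_append, foldIns_eq_sorted_set]
  rcases h : ((PySem.Str.split? content "\n").getD []).dropWhile pvIsImp with _ | ⟨r, rs⟩
  · simp
  · by_cases he : PySem.Str.strip r = ""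
    · rcases rs with _ | ⟨r2, t⟩
      · simp [he]
      · cases hs : PySem.Chars.startswith (PySem.Chars.strip r2.toList) ['\"', '\"', '\"'] <;> simp [he, hs]
    · cases hs : PySem.Chars.startswith (PySem.Chars.strip r.toList) ['\"', '\"', '\"'] <;> simp [he, hs]
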